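-- pv_equiv track=rewrite | github.com/rb-10/ehda-current-classification | elm_study.py | get_feature_groups
-- ===== SOURCE A (Python) =====
-- def get_feature_groups(feature_names):
--     """
--     Categorize features into logical groups based on naming conventions.
--     Returns a dict mapping group name -> list of feature names.
--     """
--     groups = {
--         'time_domain': [],
--         'frequency_domain': [],
--         'wavelet': [],
--         'metadata': [],
--         'statistical_moments': [],  # kurtosis, skewness, crest factor, shape factor
--     }
--
--     for feat in feature_names:
--         # Metadata / operating conditions
--         if feat in ['target_voltage', 'actual_voltage', 'voltage_error',
--                     'flow_rate', 'current_PS']: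
--             groups['metadata'].append(feat)
--
--         # Frequency domain features
--         elif feat.startswith(('band_', 'spectral_', 'dominant_freq',
--                               'mean_freq', 'median_freq', 'total_power')):
--             groups['frequency_domain'].append(feat)
--
--         # Wavelet features
--         elif feat.startswith('wt_'):
--             groups['wavelet'].append(feat)
--
--         # Statistical moments (dimensionless shape descriptors)
--         elif feat in ['kurtosis', 'skewness', 'crest_factor', 'shape_factor',
--                       'zero_crossing_rate']:
--             groups['statistical_moments'].append(feat)
--
--         # Everything else goes to time_domain
--         else:
--             groups['time_domain'].append(feat)
--
--     return groups
-- ===== SOURCE B (Python) =====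
-- METADATA = {'target_voltage', 'actual_voltage', 'voltage_error', 'flow_rate', 'current_PS'}
-- STAT_MOMENTS = {'kurtosis', 'skewness', 'crest_factor', 'shape_factor', 'zero_crossing_rate'}
-- FREQ_PREFIXES = ('band_', 'spectral_', 'dominant_freq', 'mean_freq', 'median_freq', 'total_power')
--
-- def _is_metadata(f):
--     return f in METADATA
--
-- def _is_frequency(f):
--     return f.startswith(FREQ_PREFIXES)
--
-- def _is_wavelet(f):
--     return f.startswith('wt_')
--
-- def _is_stat_moment(f):
--     return f in STAT_MOMENTS
--
-- def get_feature_groups(feature_names):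
--     preds = {
--         'frequency_domain': _is_frequency,
--         'wavelet': _is_wavelet,
--         'metadata': _is_metadata,
--         'statistical_moments': _is_stat_moment,
--     }
--     groups = {'time_domain': [f for f in feature_names
--                               if not any(p(f) for p in preds.values())]}
--     for name, pred in preds.items():
--         groups[name] = [f for f in feature_names if pred(f)]
--     return groups
-- ===== Notes on version B (the rewrite author's own statement) =====
-- stated objective: simpler
-- what changed: Replaces A's single loop with an if/elif chain appending into a mutable dict by one membership/prefix predicate per group and independent per-group filters over feature_names, with time_domain computed as the complement of the other four predicates.
import Mathlib
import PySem

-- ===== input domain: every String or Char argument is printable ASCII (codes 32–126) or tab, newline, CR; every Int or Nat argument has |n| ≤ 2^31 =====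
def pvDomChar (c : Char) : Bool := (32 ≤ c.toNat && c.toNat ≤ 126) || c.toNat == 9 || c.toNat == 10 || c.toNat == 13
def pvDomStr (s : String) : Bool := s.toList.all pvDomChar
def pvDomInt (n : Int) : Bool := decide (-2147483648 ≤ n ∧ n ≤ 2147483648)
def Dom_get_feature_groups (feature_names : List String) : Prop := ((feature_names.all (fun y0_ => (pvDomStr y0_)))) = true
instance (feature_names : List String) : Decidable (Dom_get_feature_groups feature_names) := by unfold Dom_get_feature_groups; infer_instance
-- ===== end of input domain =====

-- B restructures A's single if/elif loop into one independent membership/prefix predicate per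
-- group plus per-group filters, with time_domain as the complement (objective: simpler decomposition).

-- ===== PORT A =====
-- literal port of A: one loop over feature_names, if/elif chain appending into a dict of 5 lists
def pvStepA (d : PySem.Dict String (List String)) (feat : String) : PySem.Dict String (List String) :=
  if feat ∈ ["target_voltage", "actual_voltage", "voltage_error", "flow_rate", "current_PS"] then
    d.modify "metadata" [] (· ++ [feat])
  else if (PySem.Str.startswith feat "band_" || PySem.Str.startswith feat "spectral_" ||
           PySem.Str.startswith feat "dominant_freq" || PySem.Str.startswith feat "mean_freq" ||
           PySem.Str.startswith feat "median_freq" || PySem.Str.startswith feat "total_power") then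
    d.modify "frequency_domain" [] (· ++ [feat])
  else if PySem.Str.startswith feat "wt_" then
    d.modify "wavelet" [] (· ++ [feat])
  else if feat ∈ ["kurtosis", "skewness", "crest_factor", "shape_factor", "zero_crossing_rate"] then
    d.modify "statistical_moments" [] (· ++ [feat])
  else
    d.modify "time_domain" [] (· ++ [feat])

def get_feature_groups (feature_names : List String) : List (String × List String) :=
  (feature_names.foldl pvStepA
    (PySem.Dict.ofList [("time_domain", []), ("frequency_domain", []), ("wavelet", []),
                        ("metadata", []), ("statistical_moments", [])])).items

-- ===== PORT B =====
-- one boolean predicate per named group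
def pvIsMetadata (f : String) : Bool :=
  f ∈ ["target_voltage", "actual_voltage", "voltage_error", "flow_rate", "current_PS"]

def pvIsFrequency (f : String) : Bool :=
  PySem.Str.startswith f "band_" || PySem.Str.startswith f "spectral_" ||
  PySem.Str.startswith f "dominant_freq" || PySem.Str.startswith f "mean_freq" ||
  PySem.Str.startswith f "median_freq" || PySem.Str.startswith f "total_power"

def pvIsWavelet (f : String) : Bool := PySem.Str.startswith f "wt_"

def pvIsStatMoment (f : String) : Bool :=
  f ∈ ["kurtosis", "skewness", "crest_factor", "shape_factor", "zero_crossing_rate"]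

def get_feature_groups_alt (feature_names : List String) : List (String × List String) :=
  [("time_domain", feature_names.filter
      (fun f => !(pvIsFrequency f || pvIsWavelet f || pvIsMetadata f || pvIsStatMoment f))),
   ("frequency_domain", feature_names.filter pvIsFrequency),
   ("wavelet", feature_names.filter pvIsWavelet),
   ("metadata", feature_names.filter pvIsMetadata),
   ("statistical_moments", feature_names.filter pvIsStatMoment)]

-- ===== PRECONDITION & SPEC =====
def Spec_get_feature_groups (feature_names : List String) (out : List (String × List String)) : Prop := out = get_feature_groups_alt feature_names
instance (feature_names : List String) (out : List (String × List String)) : Decidable (Spec_get_feature_groups feature_names out) := by unfold Spec_get_feature_groups; infer_instance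

-- ===== CLAIM (what is proved, stated in full; the proofs are below) =====
def Claim_equal_get_feature_groups : Prop := ∀ (feature_names : List String), Dom_get_feature_groups feature_names → Spec_get_feature_groups feature_names (get_feature_groups feature_names)

-- ===== LEMMAS AND PROOFS =====

-- disjointness of the categories (in A's elif order)
lemma pvMeta_excl (f : String) (h : pvIsMetadata f = true) :
    pvIsFrequency f = false ∧ pvIsWavelet f = false ∧ pvIsStatMoment f = false := by
  simp [pvIsMetadata] at h
  rcases h with h | h | h | h | h <;> subst h <;> decide

lemma pvStat_excl (f : String) (h : pvIsStatMoment f = true) :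
    pvIsFrequency f = false ∧ pvIsWavelet f = false := by
  simp [pvIsStatMoment] at h
  rcases h with h | h | h | h | h <;> subst h <;> decide

lemma pvFreq_not_wavelet (f : String) (h : pvIsFrequency f = true) : pvIsWavelet f = false := by
  by_contra hw
  simp only [Bool.not_eq_false, pvIsWavelet, PySem.Str.startswith_eq,
    PySem.Chars.startswith_iff] at hw
  simp only [pvIsFrequency, Bool.or_eq_true, PySem.Str.startswith_eq,
    PySem.Chars.startswith_iff] at h
  rcases h with ((((h | h) | h) | h) | h) | h <;>
    rcases List.prefix_or_prefix_of_prefix h hw with hp | hp <;>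
      exact absurd hp (by decide)

-- the loop invariant: folding A's step onto a 5-key dict appends each filtered list
lemma pvFold (l : List String) (t fr w m s : List String) :
    (l.foldl pvStepA (PySem.Dict.mk [("time_domain", t), ("frequency_domain", fr), ("wavelet", w),
        ("metadata", m), ("statistical_moments", s)])).items =
      [("time_domain", t ++ l.filter
          (fun f => !(pvIsFrequency f || pvIsWavelet f || pvIsMetadata f || pvIsStatMoment f))),
       ("frequency_domain", fr ++ l.filter pvIsFrequency),
       ("wavelet", w ++ l.filter pvIsWavelet),
       ("metadata", m ++ l.filter pvIsMetadata),
       ("statistical_moments", s ++ l.filter pvIsStatMoment)] := by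
  induction l generalizing t fr w m s with
  | nil => simp
  | cons x l ih =>
    rw [List.foldl_cons]
    by_cases hm : pvIsMetadata x = true
    · obtain ⟨hf, hw, hs⟩ := pvMeta_excl x hm
      rw [show pvStepA (PySem.Dict.mk [("time_domain", t), ("frequency_domain", fr), ("wavelet", w),
            ("metadata", m), ("statistical_moments", s)]) x =
          PySem.Dict.mk [("time_domain", t), ("frequency_domain", fr), ("wavelet", w),
            ("metadata", m ++ [x]), ("statistical_moments", s)] by
        unfold pvStepA
        rw [if_pos (by simpa [pvIsMetadata] using hm)]
        rfl]
      rw [ih]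
      simp [hm, hf, hw, hs]
    · by_cases hf : pvIsFrequency x = true
      · have hw := pvFreq_not_wavelet x hf
        have hs : pvIsStatMoment x = false := by
          by_contra hs
          have := (pvStat_excl x (by simpa using hs)).1
          simp_all
        rw [show pvStepA (PySem.Dict.mk [("time_domain", t), ("frequency_domain", fr), ("wavelet", w),
              ("metadata", m), ("statistical_moments", s)]) x =
            PySem.Dict.mk [("time_domain", t), ("frequency_domain", fr ++ [x]), ("wavelet", w),
              ("metadata", m), ("statistical_moments", s)] by
          unfold pvStepA
          rw [if_neg (by simpa [pvIsMetadata] using hm), if_pos (by simpa [pvIsFrequency] using hf)]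
          rfl]
        rw [ih]
        simp [hm, hf, hw, hs]
      · by_cases hw : pvIsWavelet x = true
        · have hs : pvIsStatMoment x = false := by
            by_contra hs
            have := (pvStat_excl x (by simpa using hs)).2
            simp_all
          rw [show pvStepA (PySem.Dict.mk [("time_domain", t), ("frequency_domain", fr), ("wavelet", w),
                ("metadata", m), ("statistical_moments", s)]) x =
              PySem.Dict.mk [("time_domain", t), ("frequency_domain", fr), ("wavelet", w ++ [x]),
                ("metadata", m), ("statistical_moments", s)] by
            unfold pvStepA
            rw [if_neg (by simpa [pvIsMetadata] using hm), if_neg (by simpa [pvIsFrequency] using hf),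
              if_pos (by simpa [pvIsWavelet] using hw)]
            rfl]
          rw [ih]
          simp [hm, hf, hw, hs]
        · by_cases hs : pvIsStatMoment x = true
          · rw [show pvStepA (PySem.Dict.mk [("time_domain", t), ("frequency_domain", fr), ("wavelet", w),
                  ("metadata", m), ("statistical_moments", s)]) x =
                PySem.Dict.mk [("time_domain", t), ("frequency_domain", fr), ("wavelet", w),
                  ("metadata", m), ("statistical_moments", s ++ [x])] by
              unfold pvStepA
              rw [if_neg (by simpa [pvIsMetadata] using hm), if_neg (by simpa [pvIsFrequency] using hf),
                if_neg (by simpa [pvIsWavelet] using hw), if_pos (by simpa [pvIsStatMoment] using hs)]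
              rfl]
            rw [ih]
            simp [hm, hf, hw, hs]
          · rw [show pvStepA (PySem.Dict.mk [("time_domain", t), ("frequency_domain", fr), ("wavelet", w),
                  ("metadata", m), ("statistical_moments", s)]) x =
                PySem.Dict.mk [("time_domain", t ++ [x]), ("frequency_domain", fr), ("wavelet", w),
                  ("metadata", m), ("statistical_moments", s)] by
              unfold pvStepA
              rw [if_neg (by simpa [pvIsMetadata] using hm), if_neg (by simpa [pvIsFrequency] using hf),
                if_neg (by simpa [pvIsWavelet] using hw), if_neg (by simpa [pvIsStatMoment] using hs)]
              rfl]
            rw [ih]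
            simp [hm, hf, hw, hs]

-- ===== VERDICT (by name: the statement is the Claim_ definition above) =====
theorem get_feature_groups_spec : Claim_equal_get_feature_groups := by
  intro feature_names _
  show get_feature_groups feature_names = get_feature_groups_alt feature_names
  unfold get_feature_groups get_feature_groups_alt
  simpa using pvFold feature_names [] [] [] [] []
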